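-- pv_equiv track=rewrite | github.com/duclong1009/S-Selection | split_non_iid.py | iid_divide
-- ===== SOURCE A (Python) =====
-- def iid_divide(l, g):
--     """
--     https://github.com/TalwalkarLab/leaf/blob/master/data/utils/sample.py
--     divide list `l` among `g` groups
--     each group has either `int(len(l)/g)` or `int(len(l)/g)+1` elements
--     returns a list of groups
--     """
--     num_elems = len(l)
--     group_size = int(len(l) / g)
--     num_big_groups = num_elems - g * group_size
--     num_small_groups = g - num_big_groups
--     glist = []
--     for i in range(num_small_groups):
--         glist.append(l[group_size * i: group_size * (i + 1)])
--     bi = group_size * num_small_groups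
--     group_size += 1
--     for i in range(num_big_groups):
--         glist.append(l[bi + group_size * i:bi + group_size * (i + 1)])
--     return glist
-- ===== SOURCE B (Python) =====
-- def iid_divide(l, g):
--     """
--     divide list `l` among `g` groups: repeatedly peel off the first
--     (always smallest) group of int(len(rest)/g) elements from the
--     remaining list and divide what is left among one group fewer
--     """
--     glist = []
--     rest = l
--     while g > 1:
--         size = int(len(rest) / g)
--         glist.append(rest[:size])
--         rest = rest[size:]
--         g -= 1
--     glist.append(rest)
--     return glist
-- ===== Notes on version B (the rewrite author's own statement) =====
-- stated objective: alternative
-- what changed: Replaces A's two index-recomputing loops that slice all g groups by arithmetic on a precomputed group size with a peeling loop that recomputes int(len(rest)/g) from the shrinking remainder, cuts off one group, and continues with g-1 groups.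
-- outside the precondition, e.g. on iid_divide([1, 2, 3], -2): A returns [[]], B returns [[1, 2, 3]]
import Mathlib
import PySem

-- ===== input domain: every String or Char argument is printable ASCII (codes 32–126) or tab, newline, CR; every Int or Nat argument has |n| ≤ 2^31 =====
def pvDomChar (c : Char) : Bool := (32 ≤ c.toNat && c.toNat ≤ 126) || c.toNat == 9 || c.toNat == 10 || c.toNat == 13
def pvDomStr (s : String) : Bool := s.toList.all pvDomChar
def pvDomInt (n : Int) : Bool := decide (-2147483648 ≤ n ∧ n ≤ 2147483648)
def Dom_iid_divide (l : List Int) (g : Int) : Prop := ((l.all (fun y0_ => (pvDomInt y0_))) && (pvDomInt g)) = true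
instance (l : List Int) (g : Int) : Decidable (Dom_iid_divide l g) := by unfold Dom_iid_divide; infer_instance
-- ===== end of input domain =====

-- B peels off one group at a time from the shrinking remainder, recomputing the group size each step, instead of A's two index-arithmetic loops over a precomputed size (objective: alternative).


-- ===== PORT A =====
-- int(len(l) / g): exact float quotient of a 32-bit-bounded length, truncated toward zero = Int.tdiv
def iid_divide (l : List Int) (g : Int) : List (List Int) :=
  let num_elems : Int := l.length
  let group_size : Int := num_elems.tdiv g
  let num_big_groups : Int := num_elems - g * group_size
  let num_small_groups : Int := g - num_big_groups
  let glist : List (List Int) :=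
    (PySem.List.pyRange 0 num_small_groups 1).foldl
      (fun acc i => acc ++ [PySem.List.slice l (some (group_size * i)) (some (group_size * (i + 1)))]) []
  let bi : Int := group_size * num_small_groups
  let group_size' : Int := group_size + 1
  (PySem.List.pyRange 0 num_big_groups 1).foldl
    (fun acc i => acc ++ [PySem.List.slice l (some (bi + group_size' * i)) (some (bi + group_size' * (i + 1)))]) glist

-- ===== PORT B =====
-- B's while loop 'while g > 1: peel one group; g -= 1' as the obvious structural recursion
-- on g; the final 'glist.append(rest)' is the g ≤ 1 base case returning the remainder.
def iid_divide_alt (l : List Int) (g : Int) : List (List Int) :=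
  if _h : g ≤ 1 then [l]
  else
    let group_size : Int := (l.length : Int).tdiv g
    PySem.List.slice l none (some group_size) ::
      iid_divide_alt (PySem.List.slice l (some group_size) none) (g - 1)
termination_by g.toNat
decreasing_by omega

-- ===== PRECONDITION & SPEC =====
-- Pre_ excludes g ≤ 0, outside the task's natural domain ('divide among g groups'): there A
-- raises ZeroDivisionError (g = 0) or returns accidental junk from its loop arithmetic
-- (negative g), while B's loop never runs and returns [l].
def Pre_iid_divide (l : List Int) (g : Int) : Prop := 1 ≤ g
instance (l : List Int) (g : Int) : Decidable (Pre_iid_divide l g) := by unfold Pre_iid_divide; infer_instance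
def pvWitness_iid_divide : List Int × Int := ([1, 2, 3], 2)
def Spec_iid_divide (l : List Int) (g : Int) (out : List (List Int)) : Prop := out = iid_divide_alt l g
instance (l : List Int) (g : Int) (out : List (List Int)) : Decidable (Spec_iid_divide l g out) := by unfold Spec_iid_divide; infer_instance

-- ===== CLAIM (what is proved, stated in full; the proofs are below) =====
def Claim_equal_iid_divide : Prop := ∀ (l : List Int) (g : Int), Dom_iid_divide l g → Pre_iid_divide l g → Spec_iid_divide l g (iid_divide l g)

-- ===== LEMMAS AND PROOFS =====

-- proof-only reference: split l into consecutive chunks of the given sizes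
def pvSplit : List Int → List Nat → List (List Int)
  | _, [] => []
  | l, s :: ss => l.take s :: pvSplit (l.drop s) ss

-- a foldl that only appends singletons is a map
theorem pvFoldlAppendMap {α β : Type} (f : α → List β) :
    ∀ (xs : List α) (init : List (List β)),
      xs.foldl (fun acc i => acc ++ [f i]) init = init ++ xs.map f := by
  intro xs
  induction xs with
  | nil => intro init; simp
  | cons x xs ih => intro init; simp [List.foldl_cons, ih]

-- a run of k equal sizes s at the front of pvSplit is a map of take/drop chunks
theorem pvSplitReplicate (s : Nat) :
    ∀ (k : Nat) (l : List Int) (rest : List Nat),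
      pvSplit l (List.replicate k s ++ rest) =
        (List.range k).map (fun j => (l.drop (s * j)).take s) ++ pvSplit (l.drop (s * k)) rest := by
  intro k
  induction k with
  | zero => intro l rest; simp [pvSplit]
  | succ k ih =>
    intro l rest
    rw [List.replicate_succ, List.cons_append]
    show l.take s :: pvSplit (l.drop s) (List.replicate k s ++ rest) = _
    rw [ih]
    simp only [List.drop_drop]
    rw [List.range_succ_eq_map, List.map_cons, List.map_map]
    simp only [Nat.mul_zero, List.drop_zero, List.cons_append]
    congr 1
    rw [show s + s * k = s * (k + 1) by ring]
    congr 1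
    apply List.map_congr_left
    intro j _
    simp only [Function.comp_apply, Nat.succ_eq_add_one]
    rw [show s + s * j = s * (j + 1) by ring]

-- the same with no trailing sizes
theorem pvSplitReplicateNil (s k : Nat) (l : List Int) :
    pvSplit l (List.replicate k s) = (List.range k).map (fun j => (l.drop (s * j)).take s) := by
  have h := pvSplitReplicate s k l []
  simpa [pvSplit] using h

-- A's two loops compute pvSplit over (g - n%g) small sizes then n%g big sizes
theorem pvA_split (l : List Int) (gn : Nat) (hg : 1 ≤ gn) :
    iid_divide l (gn : Int) =
      pvSplit l (List.replicate (gn - l.length % gn) (l.length / gn) ++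
                 List.replicate (l.length % gn) (l.length / gn + 1)) := by
  unfold iid_divide
  set n : Nat := l.length with hn
  set gsN : Nat := n / gn with hgsN
  set nbN : Nat := n % gn with hnbN
  have hnb_lt : nbN < gn := Nat.mod_lt _ (by omega)
  have hdecomp : n = gn * gsN + nbN := (Nat.div_add_mod n gn).symm
  have hgs : (n : Int).tdiv (gn : Int) = (gsN : Int) := by
    rw [Int.tdiv_eq_ediv_of_nonneg (by positivity)]
    exact_mod_cast (Int.natCast_div n gn).symm
  simp only [hgs]
  have hnb : (n : Int) - (gn : Int) * (gsN : Int) = (nbN : Int) := by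
    push_cast; omega
  rw [hnb]
  have hns : (gn : Int) - (nbN : Int) = ((gn - nbN : Nat) : Int) := by push_cast; omega
  rw [hns]
  rw [pvFoldlAppendMap, pvFoldlAppendMap, List.nil_append]
  rw [PySem.List.pyRange_one, PySem.List.pyRange_one]
  rw [show (((gn - nbN : Nat) : Int) - 0).toNat = gn - nbN by omega,
      show (((nbN : Nat) : Int) - 0).toNat = nbN by omega]
  rw [List.map_map, List.map_map]
  rw [pvSplitReplicate, pvSplitReplicateNil]
  congr 1
  · apply List.map_congr_left
    intro j _
    simp only [Function.comp_apply, zero_add]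
    have e1 : (gsN : Int) * (j : Int) = ((gsN * j : Nat) : Int) := by push_cast; ring
    have e2 : (gsN : Int) * ((j : Int) + 1) = ((gsN * j : Nat) : Int) + (gsN : Int) := by push_cast; ring
    rw [e1, e2, PySem.List.slice_natCast_add]
  · apply List.map_congr_left
    intro j _
    simp only [Function.comp_apply, zero_add]
    have e1 : (gsN : Int) * ((gn - nbN : Nat) : Int) + ((gsN : Int) + 1) * (j : Int)
        = ((gsN * (gn - nbN) + (gsN + 1) * j : Nat) : Int) := by push_cast; ring
    have e2 : (gsN : Int) * ((gn - nbN : Nat) : Int) + ((gsN : Int) + 1) * ((j : Int) + 1)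
        = ((gsN * (gn - nbN) + (gsN + 1) * j : Nat) : Int) + ((gsN + 1 : Nat) : Int) := by push_cast; ring
    rw [e1, e2, PySem.List.slice_natCast_add, List.drop_drop]

-- B's recursion computes the same pvSplit, by induction on the number of groups
theorem pvAlt_split : ∀ (gn : Nat) (l : List Int), 1 ≤ gn →
    iid_divide_alt l (gn : Int) =
      pvSplit l (List.replicate (gn - l.length % gn) (l.length / gn) ++
                 List.replicate (l.length % gn) (l.length / gn + 1)) := by
  intro gn
  induction gn with
  | zero => intro _ h; omega
  | succ m ih =>
    intro l _
    by_cases hm : m = 0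
    · subst hm
      unfold iid_divide_alt
      rw [dif_pos (by norm_num)]
      simp [pvSplit, Nat.mod_one, Nat.div_one, List.take_length]
    · have hm1 : 1 ≤ m := by omega
      unfold iid_divide_alt
      rw [dif_neg (by exact_mod_cast by omega : ¬ ((m + 1 : Nat) : Int) ≤ 1)]
      set n : Nat := l.length with hn
      set gsN : Nat := n / (m + 1) with hgsN
      set nbN : Nat := n % (m + 1) with hnbN
      have hnb_lt : nbN < m + 1 := Nat.mod_lt _ (by omega)
      have hdecomp : n = (m + 1) * gsN + nbN := (Nat.div_add_mod n (m + 1)).symm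
      have hgs : (n : Int).tdiv ((m + 1 : Nat) : Int) = (gsN : Int) := by
        rw [Int.tdiv_eq_ediv_of_nonneg (by positivity)]
        exact_mod_cast (Int.natCast_div n (m + 1)).symm
      simp only [hgs]
      rw [PySem.List.slice_to_natCast, PySem.List.slice_from_natCast,
          show ((m + 1 : Nat) : Int) - 1 = ((m : Nat) : Int) by push_cast; ring,
          ih (l.drop gsN) hm1]
      have hmul : (m + 1) * gsN = m * gsN + gsN := by ring
      have hlen : (l.drop gsN).length = m * gsN + nbN := by
        rw [List.length_drop, ← hn]; omega
      by_cases hcase : nbN < m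
      · have hdiv : (m * gsN + nbN) / m = gsN := by
          rw [Nat.add_comm, Nat.add_mul_div_left _ _ (by omega : 0 < m),
              Nat.div_eq_of_lt hcase]; omega
        have hmod : (m * gsN + nbN) % m = nbN := by
          rw [Nat.add_comm, Nat.add_mul_mod_self_left, Nat.mod_eq_of_lt hcase]
        rw [hlen, hdiv, hmod,
            show m + 1 - nbN = (m - nbN) + 1 by omega, List.replicate_succ,
            List.cons_append, pvSplit]
      · have hnbm : nbN = m := by omega
        have hdiv : (m * gsN + nbN) / m = gsN + 1 := by
          rw [hnbm, show m * gsN + m = m * (gsN + 1) by ring,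
              Nat.mul_div_cancel_left _ (by omega : 0 < m)]
        have hmod : (m * gsN + nbN) % m = 0 := by
          rw [hnbm, show m * gsN + m = m * (gsN + 1) by ring]
          exact Nat.mul_mod_right m (gsN + 1)
        rw [hlen, hdiv, hmod, hnbm,
            show m + 1 - m = 1 by omega, show m - 0 = m by omega]
        simp [pvSplit, List.replicate_succ]

-- ===== VERDICT (by name: the statement is the Claim_ definition above) =====
theorem iid_divide_spec : Claim_equal_iid_divide := by
  intro l g _ hg
  have hg' : 1 ≤ g := hg
  unfold Spec_iid_divide
  have hge : g = ((g.toNat : Nat) : Int) := by omega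
  rw [hge, pvA_split l g.toNat (by omega), pvAlt_split g.toNat l (by omega)]
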